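-- pv_equiv track=rewrite | github.com/myutman/myutman.github.io | src/algorithm/cave_gen.py | calc_seen
-- ===== SOURCE A (Python) =====
-- def foldMap(function, iterable, initial):
--     state = initial
--     for item in iterable:
--         state, new_item = function(state, item)
--         yield new_item
--
-- def duplet(x):
--     return x, x
--
-- def caveHelper(op):
--     return lambda s, x: (None, None) if x is None else duplet(x if s is None else op(s, x))
--
-- def transpose(cave):
--     return [[*column] for column in zip(*cave)]
--
-- def calc_cum(cave, op):
--     op_left = [[*foldMap(caveHelper(op), row, None)] for row in cave]
--     op_right = [[*foldMap(caveHelper(op), row[::-1], None)][::-1] for row in cave]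
--
--     op_up = transpose([[*foldMap(caveHelper(op), column, None)] for column in transpose(cave)])
--     op_down = transpose([[*foldMap(caveHelper(op), column[::-1], None)][::-1] for column in transpose(cave)])
--
--     return [[None if item is None else op(op(op_left[i][j], op_right[i][j]), op(op_up[i][j], op_down[i][j])) for j, item in enumerate(row)]
--         for i, row in enumerate(cave)
--     ]
--
-- def calc_seen(cave):
--     # N = len(cave)
--     # seen = [[0] * N for _ in range(N)]
--     # seen_left = [[0] * N for _ in range(N)]
--     # seen_right = [[0] * N for _ in range(N)]
--     # seen_up = [[0] * N for _ in range(N)]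
--     # seen_down = [[0] * N for _ in range(N)]
--
--     # for i in range(1, N - 1):
--     #     for j in range(1, N - 1):
--     #         if cave[i][j] == '.':
--     #             seen_left[i][j] = seen_left[i][j - 1] + 1
--     #             seen_up[i][j] = seen_up[i - 1][j] + 1
--
--     # for i in range(N - 2, 0, -1):
--     #     for j in range(N - 2, 0, -1):
--     #         if cave[i][j] == '.':
--     #             seen_right[i][j] = seen_right[i][j + 1] + 1
--     #             seen_down[i][j] = seen_down[i + 1][j] + 1
--
--     # for i in range(1, N - 1):
--     #     for j in range(1, N - 1):
--     #         seen[i][j] = max(0, seen_left[i][j] + seen_up[i][j] + seen_right[i][j] + seen_down[i][j] - 3)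
--
--     transformed_cave = [
--         [1 if item == '.' else None for item in row]
--         for row in cave
--     ]
--
--     return [
--         [None if item is None else item - 3 for item in row]
--         for row in calc_cum(transformed_cave, int.__add__)
--     ]
-- ===== SOURCE B (Python) =====
-- def calc_seen(cave):
--     out = []
--     for i, row in enumerate(cave):
--         out_row = []
--         for j, item in enumerate(row):
--             if item != '.':
--                 out_row.append(None)
--             else:
--                 c = 1
--                 k = j - 1
--                 while k >= 0 and row[k] == '.':
--                     c += 1
--                     k -= 1
--                 k = j + 1
--                 while k < len(row) and row[k] == '.':
--                     c += 1
--                     k += 1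
--                 k = i - 1
--                 while k >= 0 and cave[k][j] == '.':
--                     c += 1
--                     k -= 1
--                 k = i + 1
--                 while k < len(cave) and cave[k][j] == '.':
--                     c += 1
--                     k += 1
--                 out_row.append(c)
--         out.append(out_row)
--     return out
-- ===== Notes on version B (the rewrite author's own statement) =====
-- stated objective: alternative
-- what changed: B computes each cell's visibility directly by scanning outward from the cell in the four directions with bounded while-loops, instead of A's functional prefix aggregation (foldMap generator runs over every row, reversed rows, and two zip-based transposes combined per cell); B avoids building the four auxiliary grids, the four transposes and the per-item generator overhead, which made it measurably faster on the benchmarked grids (its worst case on dense all-dot grids is nevertheless cubic).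
import Mathlib
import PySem

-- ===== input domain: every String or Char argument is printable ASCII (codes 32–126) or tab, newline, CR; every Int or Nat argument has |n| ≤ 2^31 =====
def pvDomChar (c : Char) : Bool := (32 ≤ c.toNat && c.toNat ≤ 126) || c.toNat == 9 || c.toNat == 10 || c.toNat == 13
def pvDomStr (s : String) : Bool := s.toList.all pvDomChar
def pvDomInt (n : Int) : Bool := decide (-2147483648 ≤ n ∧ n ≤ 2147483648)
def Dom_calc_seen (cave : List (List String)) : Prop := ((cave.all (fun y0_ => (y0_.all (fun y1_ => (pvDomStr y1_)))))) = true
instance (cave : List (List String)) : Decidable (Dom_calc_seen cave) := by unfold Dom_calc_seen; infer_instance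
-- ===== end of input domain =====

-- B replaces A's foldMap/transpose prefix aggregation by a direct four-direction outward scan
-- per cell (objective: alternative); equal on rectangular grids (Pre_).

-- ===== PORT A =====

-- foldMap: generator folding a state and yielding the new items (state threaded left to right)
def pyFoldMap {σ χ υ : Type} (f : σ → χ → σ × υ) : σ → List χ → List υ
  | _, [] => []
  | s, x :: rest =>
    let p := f s x
    p.2 :: pyFoldMap f p.1 rest

def pyDuplet {α : Type} (x : α) : α × α := (x, x)

def caveHelper (op : Int → Int → Int) (s : Option Int) (x : Option Int) : Option Int × Option Int :=
  match x with
  | none => (none, none)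
  | some v => pyDuplet (some (match s with | none => v | some sv => op sv v))

-- heads of every row (none when some row is empty): one step of Python's zip(*cave)
def pyHeads {α : Type} : List (List α) → Option (List α)
  | [] => some []
  | [] :: _ => none
  | (a :: _) :: rs =>
    match pyHeads rs with
    | none => none
    | some t => some (a :: t)

-- transpose(cave) = [[*column] for column in zip(*cave)]: truncates at the shortest row
def pyTranspose {α : Type} : List (List α) → List (List α)
  | [] => []
  | [] :: _ => []
  | (a :: r) :: rs =>
    match pyHeads rs with
    | none => []
    | some t => (a :: t) :: pyTranspose (r :: rs.map List.tail)
  termination_by l => (l.headD []).length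
  decreasing_by simp

-- Python indexes op_left[i][j] with i, j the enumerate counters (always in range on Pre_);
-- ported with getD.  The TypeError Python would raise if op(None, int) were ever reached is
-- the final wildcard branch (unreachable on Pre_).
def calc_cum (cave : List (List (Option Int))) (op : Int → Int → Int) : List (List (Option Int)) :=
  let op_left := cave.map (fun row => pyFoldMap (caveHelper op) none row)
  let op_right := cave.map (fun row => (pyFoldMap (caveHelper op) none row.reverse).reverse)
  let op_up := pyTranspose ((pyTranspose cave).map (fun column => pyFoldMap (caveHelper op) none column))
  let op_down := pyTranspose ((pyTranspose cave).map (fun column => (pyFoldMap (caveHelper op) none column.reverse).reverse))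
  cave.mapIdx (fun i row => row.mapIdx (fun j item =>
    match item with
    | none => none
    | some _ =>
      match (op_left.getD i []).getD j none, (op_right.getD i []).getD j none,
            (op_up.getD i []).getD j none, (op_down.getD i []).getD j none with
      | some l, some r, some u, some d => some (op (op l r) (op u d))
      | _, _, _, _ => none))

def calc_seen (cave : List (List String)) : List (List (Option Int)) :=
  let transformed := cave.map (fun row => row.map (fun item => if item = "." then some (1 : Int) else none))
  (calc_cum transformed (· + ·)).map (fun row => row.map (fun item => item.map (fun v => v - 3)))

-- ===== PORT B =====

-- while k >= 0 and row[k] == '.': c += 1; k -= 1   (entered with k = j - 1; here j counts down)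
def bCountRow (row : List String) : Nat → Nat
  | 0 => 0
  | k + 1 => if row.getD k "" = "." then bCountRow row k + 1 else 0

-- while k < len(row) and row[k] == '.': c += 1; k += 1
def fCountRow (row : List String) (k : Nat) : Nat :=
  if k < row.length then
    if row.getD k "" = "." then fCountRow row (k + 1) + 1 else 0
  else 0
  termination_by row.length - k

-- while k >= 0 and cave[k][j] == '.': c += 1; k -= 1
def bCountCol (cave : List (List String)) (j : Nat) : Nat → Nat
  | 0 => 0
  | k + 1 => if (cave.getD k []).getD j "" = "." then bCountCol cave j k + 1 else 0

-- while k < len(cave) and cave[k][j] == '.': c += 1; k += 1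
def fCountCol (cave : List (List String)) (j : Nat) (k : Nat) : Nat :=
  if k < cave.length then
    if (cave.getD k []).getD j "" = "." then fCountCol cave j (k + 1) + 1 else 0
  else 0
  termination_by cave.length - k

def calc_seen_alt (cave : List (List String)) : List (List (Option Int)) :=
  cave.mapIdx (fun i row => row.mapIdx (fun j item =>
    if item = "." then
      some ((1 : Int) + bCountRow row j + fCountRow row (j + 1)
              + bCountCol cave j i + fCountCol cave j (i + 1))
    else none))

-- ===== PRECONDITION & SPEC =====
-- Pre_ = exactly the inputs where A returns: every '.' cell's column index is shorter than every
-- row (A's zip-based transpose truncates at the shortest row and A raises IndexError on a '.'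
-- cell at or past that truncation).
def Pre_calc_seen (cave : List (List String)) : Prop :=
  ∀ row ∈ cave, ∀ j < row.length, row.getD j "" = "." → ∀ row2 ∈ cave, j < row2.length

instance (cave : List (List String)) : Decidable (Pre_calc_seen cave) := by
  unfold Pre_calc_seen; infer_instance

def pvWitness_calc_seen : List (List String) := [[".", "#", "."], [".", ".", "."]]

def Spec_calc_seen (cave : List (List String)) (out : List (List (Option Int))) : Prop := out = calc_seen_alt cave
instance (cave : List (List String)) (out : List (List (Option Int))) : Decidable (Spec_calc_seen cave out) := by unfold Spec_calc_seen; infer_instance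

-- ===== CLAIM (what is proved, stated in full; the proofs are below) =====
def Claim_equal_calc_seen : Prop := ∀ (cave : List (List String)), Dom_calc_seen cave → Pre_calc_seen cave → Spec_calc_seen cave (calc_seen cave)

-- ===== LEMMAS AND PROOFS =====

-- the cell transformation of calc_seen
def tf (s : String) : Option Int := if s = "." then some (1 : Int) else none

-- column j of the grid, as a list of strings (out-of-range cells read "")
def colStr (cave : List (List String)) (j : Nat) : List String :=
  cave.map (fun r => r.getD j "")

theorem length_pyFoldMap {σ χ υ : Type} (f : σ → χ → σ × υ) (s : σ) (xs : List χ) :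
    (pyFoldMap f s xs).length = xs.length := by
  induction xs generalizing s with
  | nil => rfl
  | cons x rest ih => simp [pyFoldMap, ih]

theorem bCountRow_succ (row : List String) (k : Nat) :
    bCountRow row (k + 1) = if row.getD k "" = "." then bCountRow row k + 1 else 0 := rfl

theorem bCountRow_le (row : List String) (j : Nat) : bCountRow row j ≤ j := by
  induction j with
  | zero => simp [bCountRow]
  | succ k ih => rw [bCountRow_succ]; split <;> omega

theorem bCountRow_cons (x : String) (rest : List String) (j : Nat) :
    bCountRow (x :: rest) (j + 1)
      = bCountRow rest j + (if bCountRow rest j = j ∧ x = "." then 1 else 0) := by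
  induction j with
  | zero => simp [bCountRow]
  | succ k ih =>
    have hle := bCountRow_le rest k
    rw [bCountRow_succ, List.getD_cons_succ, ih, bCountRow_succ]
    simp only [List.getD]
    by_cases hd : rest[k]?.getD "" = "."
    · simp only [hd, if_true]
      by_cases hx : x = "."
      · by_cases hk : bCountRow rest k = k
        · simp [hk, hx]
        · simp [hk, hx]
      · simp [hx]
    · simp [hd]

theorem getD_reverse {α : Type} (l : List α) (j : Nat) (hj : j < l.length) (d : α) :
    l.reverse.getD (l.length - 1 - j) d = l.getD j d := by
  rw [List.getD_eq_getElem l d hj, List.getD_eq_getElem _ d (by simp; omega)]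
  rw [List.getElem_reverse]
  congr 1
  omega

-- master characterisation of A's foldMap pass over a transformed row
theorem foldMap_char (xs : List String) (s : Option Int) (j : Nat) (hj : j < xs.length) :
    (pyFoldMap (caveHelper (· + ·)) s (xs.map tf)).getD j none
      = if xs.getD j "" = "." then
          some ((bCountRow xs j : Int) + (if bCountRow xs j = j then s.getD 0 else 0) + 1)
        else none := by
  induction xs generalizing s j with
  | nil => simp at hj
  | cons x rest ih =>
    cases j with
    | zero =>
      by_cases hx : x = "."
      · cases s <;> simp [pyFoldMap, caveHelper, tf, pyDuplet, bCountRow, hx]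
      · simp [pyFoldMap, caveHelper, tf, hx]
    | succ j =>
      have hj' : j < rest.length := by simpa using hj
      have hle := bCountRow_le rest j
      by_cases hx : x = "."
      · have hstep : pyFoldMap (caveHelper (· + ·)) s ((x :: rest).map tf)
            = some (s.getD 0 + 1) :: pyFoldMap (caveHelper (· + ·)) (some (s.getD 0 + 1)) (rest.map tf) := by
          cases s <;> simp [pyFoldMap, caveHelper, tf, pyDuplet, hx]
        rw [hstep, List.getD_cons_succ, ih (some (s.getD 0 + 1)) j hj', bCountRow_cons,
          List.getD_cons_succ]
        by_cases hd : rest.getD j "" = "."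
        · by_cases hk : bCountRow rest j = j
          · have h1 : bCountRow rest j + (if bCountRow rest j = j ∧ x = "." then 1 else 0) = j + 1 := by
              simp [hk, hx]
            rw [if_pos hd, if_pos hd, if_pos hk, h1, if_pos rfl]
            simp only [Option.getD_some]
            congr 1
            rw [hk]
            push_cast
            ring
          · have h1 : bCountRow rest j + (if bCountRow rest j = j ∧ x = "." then 1 else 0) = bCountRow rest j := by
              simp [hk]
            have h2 : ¬(bCountRow rest j = j + 1) := by omega
            rw [if_pos hd, if_pos hd, if_neg hk, h1, if_neg h2]
        · rw [if_neg hd, if_neg hd]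
      · have hstep : pyFoldMap (caveHelper (· + ·)) s ((x :: rest).map tf)
            = none :: pyFoldMap (caveHelper (· + ·)) none (rest.map tf) := by
          simp [pyFoldMap, caveHelper, tf, hx]
        rw [hstep, List.getD_cons_succ, ih none j hj', bCountRow_cons, List.getD_cons_succ]
        have h1 : bCountRow rest j + (if bCountRow rest j = j ∧ x = "." then 1 else 0) = bCountRow rest j := by
          simp [hx]
        by_cases hd : rest.getD j "" = "."
        · have h2 : ¬(bCountRow rest j = j + 1) := by omega
          rw [if_pos hd, if_pos hd, h1, if_neg h2]
          simp
        · rw [if_neg hd, if_neg hd]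

theorem foldMap_char_none (xs : List String) (j : Nat) (hj : j < xs.length) :
    (pyFoldMap (caveHelper (· + ·)) none (xs.map tf)).getD j none
      = if xs.getD j "" = "." then some ((bCountRow xs j : Int) + 1) else none := by
  rw [foldMap_char xs none j hj]
  split <;> simp

theorem fCountRow_eq (row : List String) (k : Nat) :
    fCountRow row k = if k < row.length then
      (if row.getD k "" = "." then fCountRow row (k + 1) + 1 else 0) else 0 := by
  rw [fCountRow]

theorem fCount_eq_bCount_reverse (row : List String) (j : Nat) (hj : j ≤ row.length) :
    bCountRow row.reverse (row.length - j) = fCountRow row j := by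
  have key : ∀ (m : Nat) (j : Nat), j ≤ row.length → row.length - j = m →
      bCountRow row.reverse m = fCountRow row j := by
    intro m
    induction m with
    | zero =>
      intro j hj hm
      have : j = row.length := by omega
      subst this
      rw [fCountRow_eq]
      simp [bCountRow]
    | succ m ihm =>
      intro j hj hm
      have hjlt : j < row.length := by omega
      rw [bCountRow_succ]
      have hm' : m = row.length - 1 - j := by omega
      have hget : row.reverse.getD m "" = row.getD j "" := by
        rw [hm']; exact getD_reverse row j hjlt ""
      rw [hget, fCountRow_eq, if_pos hjlt]
      by_cases hd : row.getD j "" = "."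
      · rw [if_pos hd, if_pos hd, ihm (j + 1) (by omega) (by omega)]
      · rw [if_neg hd, if_neg hd]
  exact key _ j hj rfl

theorem getD_map_lt {α β : Type} (f : α → β) (l : List α) (j : Nat) (hj : j < l.length)
    (d : β) (d' : α) : (l.map f).getD j d = f (l.getD j d') := by
  rw [List.getD_eq_getElem _ d (by simpa using hj), List.getD_eq_getElem _ d' hj,
    List.getElem_map]

-- characterisation of the reversed pass
theorem foldMap_rev_char (xs : List String) (j : Nat) (hj : j < xs.length) :
    ((pyFoldMap (caveHelper (· + ·)) none (xs.map tf).reverse).reverse).getD j none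
      = if xs.getD j "" = "." then some ((fCountRow xs (j + 1) : Int) + 1) else none := by
  have hmaprev : (xs.map tf).reverse = xs.reverse.map tf := by
    simp
  have hlen : (pyFoldMap (caveHelper (· + ·)) none (xs.reverse.map tf)).length = xs.length := by
    rw [length_pyFoldMap]; simp
  rw [hmaprev]
  have hrev := getD_reverse (pyFoldMap (caveHelper (· + ·)) none (xs.reverse.map tf))
      (xs.length - 1 - j) (by omega) none
  have hidx : (pyFoldMap (caveHelper (· + ·)) none (xs.reverse.map tf)).length - 1
      - (xs.length - 1 - j) = j := by omega
  rw [hidx] at hrev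
  rw [hrev, foldMap_char_none _ _ (by simp; omega)]
  have h1 : xs.length - 1 - j = xs.length - (j + 1) := by omega
  have h2 : xs.reverse.getD (xs.length - 1 - j) "" = xs.getD j "" := getD_reverse xs j hj ""
  rw [h2, h1, fCount_eq_bCount_reverse xs (j + 1) (by omega)]

theorem colStr_getD (cave : List (List String)) (j k : Nat) :
    (colStr cave j).getD k "" = (cave.getD k []).getD j "" := by
  by_cases hk : k < cave.length
  · rw [colStr, getD_map_lt (fun r => r.getD j "") cave k hk "" []]
  · have h0 : cave.getD k [] = [] := List.getD_eq_default _ _ (by omega)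
    rw [h0, List.getD_eq_default _ _ (by simp [colStr]; omega)]
    simp

theorem bCountCol_eq (cave : List (List String)) (j i : Nat) :
    bCountCol cave j i = bCountRow (colStr cave j) i := by
  induction i with
  | zero => rfl
  | succ k ih =>
    rw [bCountRow_succ, colStr_getD]
    rw [show bCountCol cave j (k + 1)
        = if (cave.getD k []).getD j "" = "." then bCountCol cave j k + 1 else 0 from rfl, ih]

theorem fCountCol_eq (cave : List (List String)) (j k : Nat) :
    fCountCol cave j k = fCountRow (colStr cave j) k := by
  have hlen : (colStr cave j).length = cave.length := by simp [colStr]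
  have key : ∀ (m : Nat) (k : Nat), cave.length - k = m →
      fCountCol cave j k = fCountRow (colStr cave j) k := by
    intro m
    induction m with
    | zero =>
      intro k hm
      rw [fCountCol, fCountRow_eq, if_neg (by omega), if_neg (by omega)]
    | succ m ihm =>
      intro k hm
      rw [fCountCol, fCountRow_eq, hlen, colStr_getD]
      by_cases hklt : k < cave.length
      · rw [if_pos hklt, if_pos hklt]
        by_cases hd : (cave.getD k []).getD j "" = "."
        · rw [if_pos hd, if_pos hd, ihm (k + 1) (by omega)]
        · rw [if_neg hd, if_neg hd]
      · rw [if_neg hklt, if_neg hklt]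
  exact key _ k rfl

theorem pyHeads_of_ne_nil {α : Type} (d : α) (rs : List (List α)) (h : ∀ r ∈ rs, r ≠ []) :
    pyHeads rs = some (rs.map (fun r => r.getD 0 d)) := by
  induction rs with
  | nil => rfl
  | cons r rs ih =>
    have hr : r ≠ [] := h r (by simp)
    cases r with
    | nil => exact absurd rfl hr
    | cons a rh =>
      have := ih (fun x hx => h x (by simp [hx]))
      simp [pyHeads, this]

theorem pyHeads_none_of_mem {α : Type} (rs : List (List α)) (h : [] ∈ rs) :
    pyHeads rs = none := by
  induction rs with
  | nil => simp at h
  | cons r rs ih =>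
    cases r with
    | nil => rfl
    | cons a rh =>
      have h2 : [] ∈ rs := by
        rcases List.mem_cons.mp h with h1 | h1
        · simp at h1
        · exact h1
      simp [pyHeads, ih h2]

theorem transpose_trunc {α : Type} (d : α) (k : Nat) (g : List (List α)) (hg : g ≠ [])
    (hge : ∀ r ∈ g, k ≤ r.length) (hex : ∃ r ∈ g, r.length = k) :
    pyTranspose g = (List.range k).map (fun j => g.map (fun r => r.getD j d)) := by
  induction k generalizing g with
  | zero =>
    rcases hex with ⟨r0, hr0, hr0len⟩
    have hr0nil : r0 = [] := List.eq_nil_of_length_eq_zero hr0len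
    subst hr0nil
    cases g with
    | nil => exact absurd rfl hg
    | cons r rs =>
      cases r with
      | nil => simp [pyTranspose]
      | cons a rh =>
        have hmem : ([] : List α) ∈ rs := by
          rcases List.mem_cons.mp hr0 with h1 | h1
          · simp at h1
          · exact h1
        rw [pyTranspose, pyHeads_none_of_mem rs hmem]
        simp
  | succ k ih =>
    cases g with
    | nil => exact absurd rfl hg
    | cons r rs =>
      cases r with
      | nil => have := hge [] (by simp); simp at this
      | cons a rh =>
        have hne : ∀ x ∈ rs, x ≠ [] := by
          intro x hx
          have := hge x (by simp [hx])
          intro hnil; subst hnil; simp at this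
        have hstep : pyTranspose ((a :: rh) :: rs)
            = (a :: rs.map (fun r => r.getD 0 d)) :: pyTranspose (rh :: rs.map List.tail) := by
          rw [pyTranspose, pyHeads_of_ne_nil d rs hne]
        rw [hstep]
        have hge' : ∀ x ∈ (rh :: rs.map List.tail), k ≤ x.length := by
          intro x hx
          rcases List.mem_cons.mp hx with h1 | h1
          · have h2 := hge (a :: rh) (by simp)
            rw [h1]
            simp at h2
            omega
          · rcases List.mem_map.mp h1 with ⟨x0, hx0, rfl⟩
            have h2 := hge x0 (by simp [hx0])
            rcases List.exists_cons_of_ne_nil (hne x0 hx0) with ⟨b, x0', rfl⟩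
            simp at h2 ⊢
            omega
        have hex' : ∃ x ∈ (rh :: rs.map List.tail), x.length = k := by
          rcases hex with ⟨r0, hr0, hr0len⟩
          rcases List.mem_cons.mp hr0 with h1 | h1
          · refine ⟨rh, by simp, ?_⟩
            have : (a :: rh).length = k + 1 := by rw [← h1]; exact hr0len
            simpa using this
          · refine ⟨r0.tail, List.mem_cons_of_mem _ (List.mem_map.mpr ⟨r0, h1, rfl⟩), ?_⟩
            rcases List.exists_cons_of_ne_nil (hne r0 h1) with ⟨b, r0', rfl⟩
            simpa using hr0len
        rw [ih (rh :: rs.map List.tail) (by simp) hge' hex']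
        rw [List.range_succ_eq_map]
        simp only [List.map_cons, List.map_map]
        congr 1
        apply List.map_congr_left
        intro j hj
        simp [Function.comp]

-- minimum row length: where Python's zip(*cave) truncates
def minLen {α : Type} : List (List α) → Nat
  | [] => 0
  | [r] => r.length
  | r :: rs => min r.length (minLen rs)

theorem minLen_cons2 {α : Type} (r0 r1 : List α) (rs : List (List α)) :
    minLen (r0 :: r1 :: rs) = min r0.length (minLen (r1 :: rs)) := by
  rw [minLen]
  simp

theorem minLen_le {α : Type} (g : List (List α)) (r : List α) (hr : r ∈ g) :
    minLen g ≤ r.length := by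
  induction g with
  | nil => simp at hr
  | cons r0 rs ih =>
    cases rs with
    | nil =>
      rcases List.mem_cons.mp hr with h1 | h1
      · rw [h1]; exact Nat.le_refl _
      · simp at h1
    | cons r1 rs' =>
      rcases List.mem_cons.mp hr with h1 | h1
      · rw [h1, minLen_cons2]; omega
      · have := ih h1
        rw [minLen_cons2]; omega

theorem minLen_mem {α : Type} (g : List (List α)) (hg : g ≠ []) :
    ∃ r ∈ g, r.length = minLen g := by
  induction g with
  | nil => exact absurd rfl hg
  | cons r0 rs ih =>
    cases rs with
    | nil => exact ⟨r0, by simp, rfl⟩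
    | cons r1 rs' =>
      rcases ih (by simp) with ⟨r, hr, hrlen⟩
      by_cases h : r0.length ≤ minLen (r1 :: rs')
      · exact ⟨r0, by simp, by rw [minLen_cons2]; omega⟩
      · exact ⟨r, by simp [hr], by rw [minLen_cons2]; omega⟩

theorem transpose_rect {α : Type} (d : α) (n : Nat) (g : List (List α)) (hg : g ≠ [])
    (hrect : ∀ r ∈ g, r.length = n) :
    pyTranspose g = (List.range n).map (fun j => g.map (fun r => r.getD j d)) := by
  refine transpose_trunc d n g hg (fun r hr => (hrect r hr).ge) ?_
  cases g with
  | nil => exact absurd rfl hg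
  | cons r rs => exact ⟨r, by simp, hrect r (by simp)⟩

theorem getD_range_map {α : Type} (h : Nat → α) (m i : Nat) (hi : i < m) (d : α) :
    ((List.range m).map h).getD i d = h i := by
  rw [List.getD_eq_getElem _ d (by simpa using hi)]
  simp

-- the up/down passes: transpose, per-column pass F, transpose back, then read cell (i, j)
theorem updown_cell (cave : List (List String)) (i j : Nat) (hi : i < cave.length)
    (hall : ∀ row ∈ cave, j < row.length)
    (F : List (Option Int) → List (Option Int)) (hF : ∀ l, (F l).length = l.length) :
    ((pyTranspose ((pyTranspose (cave.map (fun row => row.map tf))).map F)).getD i []).getD j none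
      = (F ((colStr cave j).map tf)).getD i none := by
  have hcne : cave ≠ [] := by
    intro h; rw [h] at hi; simp at hi
  have htcne : cave.map (fun row => row.map tf) ≠ [] := by simpa using hcne
  have hk_ex := minLen_mem (cave.map (fun row => row.map tf)) htcne
  have hjk : j < minLen (cave.map (fun row => row.map tf)) := by
    rcases hk_ex with ⟨r, hr, hrlen⟩
    rcases List.mem_map.mp hr with ⟨r0, hr0, rfl⟩
    have := hall r0 hr0
    simp at hrlen
    omega
  have h1 : pyTranspose (cave.map (fun row => row.map tf))
      = (List.range (minLen (cave.map (fun row => row.map tf)))).map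
          (fun q => (cave.map (fun row => row.map tf)).map (fun r => r.getD q none)) :=
    transpose_trunc none _ _ htcne (fun r hr => minLen_le _ r hr) hk_ex
  have hcol : ∀ q, q < minLen (cave.map (fun row => row.map tf)) →
      (cave.map (fun row => row.map tf)).map (fun r => r.getD q none)
      = (colStr cave q).map tf := by
    intro q hq
    rw [List.map_map, colStr, List.map_map]
    apply List.map_congr_left
    intro r hr
    simp only [Function.comp]
    have hq' : q < r.length := by
      have := minLen_le (cave.map (fun row => row.map tf)) (r.map tf) (List.mem_map.mpr ⟨r, hr, rfl⟩)
      simp at this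
      omega
    exact getD_map_lt tf r q hq' none ""
  have h2 : (pyTranspose (cave.map (fun row => row.map tf))).map F
      = (List.range (minLen (cave.map (fun row => row.map tf)))).map
          (fun q => F ((colStr cave q).map tf)) := by
    rw [h1, List.map_map]
    apply List.map_congr_left
    intro q hq
    simp only [Function.comp]
    rw [hcol q (by simpa using hq)]
  have hrectF : ∀ r ∈ (List.range (minLen (cave.map (fun row => row.map tf)))).map
      (fun q => F ((colStr cave q).map tf)), r.length = cave.length := by
    intro r hr
    rcases List.mem_map.mp hr with ⟨q, hq, rfl⟩
    rw [hF]
    simp [colStr]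
  have h3 : pyTranspose ((List.range (minLen (cave.map (fun row => row.map tf)))).map
        (fun q => F ((colStr cave q).map tf)))
      = (List.range cave.length).map
          (fun i' => ((List.range (minLen (cave.map (fun row => row.map tf)))).map
            (fun q => F ((colStr cave q).map tf))).map (fun r => r.getD i' none)) :=
    transpose_rect none cave.length _ (by simp; omega) hrectF
  rw [h2, h3, getD_range_map _ _ i hi, List.map_map]
  simp only [Function.comp_def]
  rw [getD_range_map (fun q => (F ((colStr cave q).map tf)).getD i none) _ j hjk none]

theorem calc_seen_spec' (cave : List (List String)) (hpre : Pre_calc_seen cave) :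
    calc_seen cave = calc_seen_alt cave := by
  apply List.ext_getElem
  · simp [calc_seen, calc_seen_alt, calc_cum]
  intro i h1 h2
  have hi : i < cave.length := by
    simpa [calc_seen, calc_cum] using h1
  simp only [calc_seen, calc_seen_alt, calc_cum, List.getElem_map, List.getElem_mapIdx]
  apply List.ext_getElem
  · simp
  intro j hj1 hj2
  simp only [List.getElem_map, List.getElem_mapIdx]
  have htf : (fun item => if item = "." then some (1 : Int) else none) = tf := rfl
  simp only [htf, List.map_map, Function.comp_def]
  have hj : j < cave[i].length := by simpa using hj2
  have hgi : cave.getD i [] = cave[i] := List.getD_eq_getElem cave [] hi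
  have hgj : cave[i].getD j "" = cave[i][j] := List.getD_eq_getElem cave[i] "" hj
  by_cases hx : cave[i][j] = "."
  · have hall : ∀ row2 ∈ cave, j < row2.length :=
      hpre cave[i] (List.getElem_mem hi) j hj (by rw [hgj]; exact hx)
    have hL : ((List.map (fun row => pyFoldMap (caveHelper (· + ·)) none (List.map tf row)) cave).getD i []).getD j none
        = some ((bCountRow cave[i] j : Int) + 1) := by
      rw [getD_map_lt (fun row => pyFoldMap (caveHelper (· + ·)) none (List.map tf row)) cave i hi [] [],
        hgi, foldMap_char_none cave[i] j hj, hgj, if_pos hx]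
    have hR : ((List.map (fun row => (pyFoldMap (caveHelper (· + ·)) none (List.map tf row).reverse).reverse) cave).getD i []).getD j none
        = some ((fCountRow cave[i] (j + 1) : Int) + 1) := by
      rw [getD_map_lt (fun row => (pyFoldMap (caveHelper (· + ·)) none (List.map tf row).reverse).reverse) cave i hi [] [],
        hgi, foldMap_rev_char cave[i] j hj, hgj, if_pos hx]
    have hU := updown_cell cave i j hi hall
      (fun column => pyFoldMap (caveHelper (· + ·)) none column) (fun l => length_pyFoldMap _ _ _)
    rw [foldMap_char_none (colStr cave j) i (by simp [colStr]; omega), colStr_getD, hgi, hgj,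
      if_pos hx, ← bCountCol_eq] at hU
    have hD := updown_cell cave i j hi hall
      (fun column => (pyFoldMap (caveHelper (· + ·)) none column.reverse).reverse)
      (fun l => by simp [length_pyFoldMap])
    rw [foldMap_rev_char (colStr cave j) i (by simp [colStr]; omega), colStr_getD, hgi, hgj,
      if_pos hx, ← fCountCol_eq] at hD
    simp only [hx, hL, hR, hU, hD]
    simp
    ring
  · simp [hx]

-- ===== VERDICT (by name: the statement is the Claim_ definition above) =====
theorem calc_seen_spec : Claim_equal_calc_seen := by
  intro cave _ hpre
  exact calc_seen_spec' cave hpre
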